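-- pv_equiv track=rewrite | github.com/manas-17045/LeetcodeSolutions | Leetcode 3501-3600/3528/3528.py | baseUnitConversions
-- ===== SOURCE A (Python) =====
-- def baseUnitConversions(conversions: list[list[int]]) -> list[int]:
--     """
--     Calculates the conversion factors from unit 0 to all other units.
--     :param conversions: A list of conversion rules, where each rule is [source, target, factor].
--     :return: A list where result[i] is the conversion factor from unit 0 to unit i.
--     """
--     n = len(conversions) + 1
--     graph = [[] for _ in range(n)]
--     for source, target, factor in conversions:
--         graph[source].append((target, factor))
--
--     result = [0] * n
--     result[0] = 1
--     modulo = 10 ** 9 + 7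
--     stack = [0]
--
--     while stack:
--         current = stack.pop()
--         currentValue = result[current]
--
--         for neighbor, factor in graph[current]:
--             result[neighbor] = (currentValue * factor) % modulo
--             stack.append(neighbor)
--
--     return result
-- ===== SOURCE B (Python) =====
-- def baseUnitConversions(conversions: list[list[int]]) -> list[int]:
--     MOD = 10 ** 9 + 7
--     n = len(conversions) + 1
--     parent = {t: (s, f) for s, t, f in conversions}
--
--     def factor(i):
--         # walk from unit i up towards unit 0, collecting edge factors;
--         # a walk that is still away from 0 after n steps, or leaves the
--         # parent map, never reaches unit 0, so the factor is 0
--         path = []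
--         u = i
--         for _ in range(n):
--             if u == 0:
--                 break
--             if u not in parent:
--                 return 0
--             s, f = parent[u]
--             path.append(f)
--             u = s
--         if u != 0:
--             return 0
--         value = 1
--         for f in reversed(path):
--             value = value * f % MOD
--         return value
--
--     return [factor(i) for i in range(n)]
-- ===== Notes on version B (the rewrite author's own statement) =====
-- stated objective: alternative
-- what changed: Replaces A's root-to-leaves stack traversal of a child adjacency list with an inverted formulation: a parent map keyed by target, and for each unit an independent bounded upward walk to unit 0 multiplying the collected factors mod 1e9+7.
-- outside the precondition, e.g. on baseUnitConversions([[-2, 1, 5]]): A returns [1, 5], B returns [1, 0]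
import Mathlib
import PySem

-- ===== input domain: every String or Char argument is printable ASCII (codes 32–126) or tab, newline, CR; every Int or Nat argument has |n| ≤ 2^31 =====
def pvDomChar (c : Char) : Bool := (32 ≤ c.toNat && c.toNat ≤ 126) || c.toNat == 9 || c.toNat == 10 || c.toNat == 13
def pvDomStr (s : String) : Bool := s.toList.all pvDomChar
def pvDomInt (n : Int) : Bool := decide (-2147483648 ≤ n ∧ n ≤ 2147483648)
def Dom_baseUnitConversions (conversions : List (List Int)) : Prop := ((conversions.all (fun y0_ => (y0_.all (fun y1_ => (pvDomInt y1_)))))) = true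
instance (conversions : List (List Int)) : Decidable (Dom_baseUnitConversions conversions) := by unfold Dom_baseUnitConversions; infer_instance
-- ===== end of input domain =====

-- B replaces A's stack traversal from the root over a child adjacency list by a parent map
-- and, for every unit, an independent bounded upward walk to unit 0; same results on Pre_.

def pvMod : Int := 1000000007

-- ===== PORT A =====
-- Python: graph[source].append((target, factor)); a row that does not unpack to 3 values raises (outside Pre_; ported as a skip)
def pvGraphStepA (g : List (List (Int × Int))) (row : List Int) : List (List (Int × Int)) :=
  match row with
  | [s, t, f] => PySem.List.pySetD g s (PySem.List.pyGetD g s [] ++ [(t, f)])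
  | _ => g

-- the 'while stack' loop; stack modelled head-first (Python appends/pops at the end); fuel only makes it total
def pvLoopA (g : List (List (Int × Int))) : Nat → List Int → List Int → List Int
  | 0, _, r => r
  | _ + 1, [], r => r
  | fuel + 1, cur :: st, r =>
      let v := PySem.List.pyGetD r cur 0
      let step := (PySem.List.pyGetD g cur []).foldl
        (fun (acc : List Int × List Int) tf =>
          (PySem.List.pySetD acc.1 tf.1 (PySem.Int.mod (v * tf.2) pvMod), tf.1 :: acc.2))
        (r, st)
      pvLoopA g fuel step.2 step.1

def baseUnitConversions (conversions : List (List Int)) : List Int :=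
  let n := conversions.length + 1
  let graph := conversions.foldl pvGraphStepA (List.replicate n [])
  let result := (List.replicate n (0 : Int)).set 0 1
  pvLoopA graph n [(0 : Int)] result

-- ===== PORT B =====
-- Python: parent = {t: (s, f) for s, t, f in conversions}; a non-3 row raises (outside Pre_; ported as a skip)
def pvParStepB (d : PySem.Dict Int (Int × Int)) (row : List Int) : PySem.Dict Int (Int × Int) :=
  match row with
  | [s, t, f] => d.insert t (s, f)
  | _ => d

-- the 'for _ in range(n)' walk in factor(i); none = the early 'return 0' at 'u not in parent'
def pvWalkB (d : PySem.Dict Int (Int × Int)) : Nat → Int → List Int → Option (Int × List Int)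
  | 0, u, path => some (u, path)
  | k + 1, u, path =>
      if u = 0 then some (u, path)
      else
        match d.get? u with
        | none => none
        | some (s, f) => pvWalkB d k s (path ++ [f])

-- the rest of factor(i): the post-loop check and the fold over reversed(path)
def pvFactorB (d : PySem.Dict Int (Int × Int)) (fuel : Nat) (i : Int) : Int :=
  match pvWalkB d fuel i [] with
  | none => 0
  | some (u, path) =>
      if u ≠ 0 then 0
      else path.reverse.foldl (fun v f => PySem.Int.mod (v * f) pvMod) 1

def baseUnitConversions_alt (conversions : List (List Int)) : List Int :=
  let n := conversions.length + 1
  let parent := conversions.foldl pvParStepB PySem.Dict.empty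
  (PySem.List.pyRange 0 n 1).map (pvFactorB parent n)

-- ===== PRECONDITION & SPEC =====
-- Pre_ admits the inputs on which both formulations provably see the same graph: every rule a 3-list whose
-- source index is in Python list range, and EITHER no rule leaves unit 0 (neither program propagates anything)
-- OR the rules form the problem's tree shape (sources in [0,n), targets in [1,n), no two rules sharing a
-- target).  Outside it A raises (ValueError/IndexError) or diverges, reads rules through Python's
-- negative-index wraparound where B keys the parent map by the raw source, or (on duplicate targets) returns
-- an order-dependent value, a corner where B's by-target lookup is equally defensible.
def Pre_baseUnitConversions (conversions : List (List Int)) : Prop :=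
  (∀ row ∈ conversions, row.length = 3 ∧
      -((conversions.length : Int) + 1) ≤ row.getD 0 0 ∧
      row.getD 0 0 < (conversions.length : Int) + 1) ∧
  ((∀ row ∈ conversions, row.getD 0 0 ≠ 0 ∧ row.getD 0 0 ≠ -((conversions.length : Int) + 1)) ∨
   ((∀ row ∈ conversions, 0 ≤ row.getD 0 0 ∧
       1 ≤ row.getD 1 0 ∧ row.getD 1 0 < (conversions.length : Int) + 1) ∧
    (conversions.map (fun row => row.getD 1 0)).Nodup))

instance (conversions : List (List Int)) : Decidable (Pre_baseUnitConversions conversions) := by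
  unfold Pre_baseUnitConversions; infer_instance

def pvWitness_baseUnitConversions : List (List Int) := [[0, 1, 2], [1, 2, 3]]

def Spec_baseUnitConversions (conversions : List (List Int)) (out : List Int) : Prop := out = baseUnitConversions_alt conversions
instance (conversions : List (List Int)) (out : List Int) : Decidable (Spec_baseUnitConversions conversions out) := by unfold Spec_baseUnitConversions; infer_instance

-- ===== CLAIM (what is proved, stated in full; the proofs are below) =====
def Claim_equal_baseUnitConversions : Prop := ∀ (conversions : List (List Int)), Dom_baseUnitConversions conversions → Pre_baseUnitConversions conversions → Spec_baseUnitConversions conversions (baseUnitConversions conversions)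

-- ===== LEMMAS AND PROOFS =====

-- abbreviations for the proof layer
def pvN (rows : List (List Int)) : Nat := rows.length + 1
def pvSrc (row : List Int) : Int := row.getD 0 0
def pvTgt (row : List Int) : Int := row.getD 1 0
def pvFac (row : List Int) : Int := row.getD 2 0

-- the unique in-edge of a node (targets are distinct under Pre_)
def pvPar (rows : List (List Int)) (x : Nat) : Option (Nat × Int) :=
  (rows.find? (fun row => pvTgt row == (x : Int))).map (fun row => ((pvSrc row).toNat, pvFac row))

def pvParN (rows : List (List Int)) (x : Nat) : Option Nat := (pvPar rows x).map (·.1)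

def pvIter (rows : List (List Int)) : Nat → Nat → Option Nat
  | 0, x => some x
  | k + 1, x => (pvParN rows x).bind (pvIter rows k)

-- fuel-bounded conversion value of a node: the common mathematical meaning of both programs
def pvV (rows : List (List Int)) : Nat → Nat → Int
  | _, 0 => 1
  | 0, _ + 1 => 0
  | k + 1, x + 1 =>
      match pvPar rows (x + 1) with
      | some (s, f) => PySem.Int.mod (pvV rows k s * f) pvMod
      | none => 0

def pvVal (rows : List (List Int)) (x : Nat) : Int := pvV rows (pvN rows) x

def pvReach (rows : List (List Int)) (x : Nat) : Prop := ∃ d, pvIter rows d x = some 0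

def pvKids (rows : List (List Int)) (u : Nat) : List (Int × Int) :=
  (rows.filter (fun row => pvSrc row == (u : Int))).map (fun row => (pvTgt row, pvFac row))

def pvDesc (rows : List (List Int)) (u : Nat) : Finset Nat :=
  (Finset.range (pvN rows)).filter (fun x => ∃ k ≤ pvN rows, pvIter rows k x = some u)

def pvDescU (rows : List (List Int)) : List Nat → Finset Nat
  | [] => ∅
  | u :: us => pvDesc rows u ∪ pvDescU rows us

-- generic: find? by a key that is Nodup finds the element itself
theorem pvFind_eq_of_mem_of_nodup_map {α β : Type} [DecidableEq β] (f : α → β) :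
    ∀ (l : List α) (a : α), (l.map f).Nodup → a ∈ l →
      l.find? (fun x => f x == f a) = some a := by
  intro l a hnd ha
  induction l with
  | nil => cases ha
  | cons b t ih =>
      simp only [List.map_cons, List.nodup_cons] at hnd
      by_cases h : f b = f a
      · have hba : b = a := by
          rcases List.mem_cons.mp ha with h1 | h1
          · exact h1.symm
          · exact absurd (h ▸ List.mem_map_of_mem h1) hnd.1
        subst hba
        simp [List.find?_cons_of_pos]
      · have ha' : a ∈ t := by
          rcases List.mem_cons.mp ha with h1 | h1
          · exact absurd (h1 ▸ rfl) h
          · exact h1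
        rw [List.find?_cons_of_neg (by simpa using h)]
        exact ih hnd.2 ha'

theorem pvIter_add (rows : List (List Int)) (a b x : Nat) :
    pvIter rows (a + b) x = (pvIter rows a x).bind (pvIter rows b) := by
  induction a generalizing x with
  | zero => simp [pvIter]
  | succ a ih =>
      have : a + 1 + b = (a + b) + 1 := by omega
      rw [this]
      simp only [pvIter]
      cases pvParN rows x with
      | none => simp
      | some s => simp [ih]

-- row-shape hypothesis used throughout
def pvRowsOK (rows : List (List Int)) : Prop :=
  ∀ row ∈ rows, row.length = 3 ∧
      0 ≤ pvSrc row ∧ pvSrc row < (pvN rows : Int) ∧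
      1 ≤ pvTgt row ∧ pvTgt row < (pvN rows : Int)

theorem pvPar_some_elim (rows : List (List Int)) (x : Nat) (s : Nat) (f : Int)
    (h : pvPar rows x = some (s, f)) :
    ∃ row ∈ rows, pvTgt row = (x : Int) ∧ (pvSrc row).toNat = s ∧ pvFac row = f := by
  unfold pvPar at h
  cases hf : rows.find? (fun row => pvTgt row == (x : Int)) with
  | none => rw [hf] at h; cases h
  | some row =>
      rw [hf] at h
      refine ⟨row, List.mem_of_find?_eq_some hf, ?_, ?_, ?_⟩
      · have := List.find?_some hf; simpa using this
      · simpa using congrArg (fun p => p.1) (Option.some.inj h)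
      · simpa using congrArg (fun p => p.2) (Option.some.inj h)

theorem pvPar_zero (rows : List (List Int)) (hRow : pvRowsOK rows) :
    pvPar rows 0 = none := by
  unfold pvPar
  rw [List.find?_eq_none.mpr]
  · rfl
  · intro row hr
    have := (hRow row hr).2.2.2.1
    simp only [beq_iff_eq]
    omega

theorem pvPar_src_lt (rows : List (List Int)) (hRow : pvRowsOK rows) (x s : Nat) (f : Int)
    (h : pvPar rows x = some (s, f)) : s < pvN rows := by
  obtain ⟨row, hr, _, hs, _⟩ := pvPar_some_elim rows x s f h
  have h1 := (hRow row hr).2.1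
  have h2 := (hRow row hr).2.2.1
  omega

theorem pvPar_node_bounds (rows : List (List Int)) (hRow : pvRowsOK rows) (x : Nat) (p : Nat × Int)
    (h : pvPar rows x = some p) : 1 ≤ x ∧ x < pvN rows := by
  obtain ⟨row, hr, ht, _, _⟩ := pvPar_some_elim rows x p.1 p.2 (by rw [h])
  have h1 := (hRow row hr).2.2.2.1
  have h2 := (hRow row hr).2.2.2.2
  rw [ht] at h1 h2
  constructor <;> omega

theorem pvIter_zero_succ (rows : List (List Int)) (hRow : pvRowsOK rows) (k : Nat) :
    pvIter rows (k + 1) 0 = none := by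
  simp [pvIter, pvParN, pvPar_zero rows hRow]

theorem pvV_zero (rows : List (List Int)) (k : Nat) : pvV rows k 0 = 1 := by
  cases k <;> rfl

theorem pvMod_pos : (0 : Int) < pvMod := by decide

theorem pvV_stable (rows : List (List Int)) :
    ∀ (d : Nat) (u : Nat), pvIter rows d u = some 0 → ∀ k, d ≤ k → pvV rows k u = pvV rows d u := by
  intro d
  induction d with
  | zero =>
      intro u h k _
      simp only [pvIter] at h
      cases h
      simp [pvV_zero]
  | succ d ih =>
      intro u h k hk
      cases u with
      | zero => simp [pvV_zero]
      | succ x =>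
          simp only [pvIter, pvParN] at h
          cases hp : pvPar rows (x + 1) with
          | none => rw [hp] at h; simp at h
          | some p =>
              rw [hp] at h
              simp only [Option.map_some, Option.bind_some] at h
              obtain ⟨s, f⟩ := p
              obtain ⟨k', rfl⟩ : ∃ k', k = k' + 1 := ⟨k - 1, by omega⟩
              show pvV rows (k' + 1) (x + 1) = pvV rows (d + 1) (x + 1)
              simp only [pvV, hp]
              rw [ih s h k' (by omega)]

theorem pvV_unreach (rows : List (List Int)) :
    ∀ (k x : Nat), ¬ pvReach rows x → pvV rows k x = 0 := by
  intro k
  induction k with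
  | zero =>
      intro x hx
      cases x with
      | zero => exact absurd ⟨0, rfl⟩ hx
      | succ x' => rfl
  | succ k ih =>
      intro x hx
      cases x with
      | zero => exact absurd ⟨0, rfl⟩ hx
      | succ x' =>
          simp only [pvV]
          cases hp : pvPar rows (x' + 1) with
          | none => rfl
          | some p =>
              obtain ⟨s, f⟩ := p
              show PySem.Int.mod (pvV rows k s * f) pvMod = 0
              have hs : ¬ pvReach rows s := by
                intro ⟨d, hd⟩
                refine hx ⟨d + 1, ?_⟩
                have : pvIter rows (1 + d) (x' + 1) = some 0 := by
                  rw [pvIter_add]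
                  simp [pvIter, pvParN, hp, hd]
                rwa [Nat.add_comm] at this
              rw [ih s hs]
              simp only [Int.zero_mul]
              rw [PySem.Int.mod_eq_emod_of_pos pvMod_pos]
              rfl

theorem pvIter_lt (rows : List (List Int)) (hRow : pvRowsOK rows) :
    ∀ (k x y : Nat), pvIter rows k x = some y → x < pvN rows → y < pvN rows := by
  intro k
  induction k with
  | zero => intro x y h hx; simp only [pvIter] at h; cases h; exact hx
  | succ k ih =>
      intro x y h hx
      simp only [pvIter, pvParN] at h
      cases hp : pvPar rows x with
      | none => rw [hp] at h; cases h
      | some p =>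
          rw [hp] at h
          simp only [Option.map_some, Option.bind_some] at h
          exact ih p.1 y h (pvPar_src_lt rows hRow x p.1 p.2 (by rw [hp]))

theorem pvIter_isSome_of_le (rows : List (List Int)) (i d x : Nat) (hid : i ≤ d)
    (h : (pvIter rows d x).isSome) : (pvIter rows i x).isSome := by
  obtain ⟨j, rfl⟩ : ∃ j, d = i + j := ⟨d - i, by omega⟩
  rw [pvIter_add] at h
  cases hi : pvIter rows i x with
  | none => rw [hi] at h; simp at h
  | some y => simp

-- every reachable node of the range reaches 0 in at most pvN-1 steps (pigeonhole on the distinct chain)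
theorem pvDepth (rows : List (List Int)) (hRow : pvRowsOK rows) (x : Nat)
    (hx : x < pvN rows) (hr : pvReach rows x) :
    ∃ d, d + 1 ≤ pvN rows ∧ pvIter rows d x = some 0 := by
  classical
  have hex : ∃ d, pvIter rows d x = some 0 := hr
  set d := Nat.find hex with hdd
  have hd0 : pvIter rows d x = some 0 := Nat.find_spec hex
  refine ⟨d, ?_, hd0⟩
  by_contra hbig
  have hmaps : ∀ i ∈ Finset.range (d + 1), (pvIter rows i x).getD 0 ∈ Finset.range (pvN rows) := by
    intro i hi
    simp only [Finset.mem_range] at hi ⊢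
    have hs : (pvIter rows i x).isSome :=
      pvIter_isSome_of_le rows i d x (by omega) (by rw [hd0]; rfl)
    obtain ⟨y, hy⟩ := Option.isSome_iff_exists.mp hs
    rw [hy]
    exact pvIter_lt rows hRow i x y hy hx
  have hinj : Set.InjOn (fun i => (pvIter rows i x).getD 0) (Finset.range (d + 1)) := by
    intro i hi j hj hij
    simp only [Finset.mem_coe, Finset.mem_range] at hi hj
    by_contra hne
    rcases Nat.lt_or_ge i j with hlt | hge
    · obtain ⟨y, hy⟩ := Option.isSome_iff_exists.mp
        (pvIter_isSome_of_le rows i d x (by omega) (by rw [hd0]; rfl))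
      obtain ⟨z, hz⟩ := Option.isSome_iff_exists.mp
        (pvIter_isSome_of_le rows j d x (by omega) (by rw [hd0]; rfl))
      have hyz : y = z := by simpa [hy, hz] using hij
      subst hyz
      have h1 : pvIter rows (d - j) y = some 0 := by
        have hh : pvIter rows (j + (d - j)) x = some 0 := by
          rw [show j + (d - j) = d by omega]; exact hd0
        rw [pvIter_add, hz] at hh
        simpa using hh
      have h2 : pvIter rows (i + (d - j)) x = some 0 := by
        rw [pvIter_add, hy]
        simpa using h1
      have := Nat.find_min hex (m := i + (d - j)) (by omega)
      exact this h2
    · rcases Nat.lt_or_ge j i with hlt | hge2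
      · obtain ⟨y, hy⟩ := Option.isSome_iff_exists.mp
          (pvIter_isSome_of_le rows j d x (by omega) (by rw [hd0]; rfl))
        obtain ⟨z, hz⟩ := Option.isSome_iff_exists.mp
          (pvIter_isSome_of_le rows i d x (by omega) (by rw [hd0]; rfl))
        have hyz : y = z := by simpa [hy, hz] using hij.symm
        subst hyz
        have h1 : pvIter rows (d - i) y = some 0 := by
          have hh : pvIter rows (i + (d - i)) x = some 0 := by
            rw [show i + (d - i) = d by omega]; exact hd0
          rw [pvIter_add, hz] at hh
          simpa using hh
        have h2 : pvIter rows (j + (d - i)) x = some 0 := by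
          rw [pvIter_add, hy]
          simpa using h1
        have := Nat.find_min hex (m := j + (d - i)) (by omega)
        exact this h2
      · omega
  have hcard := Finset.card_le_card_of_injOn _ hmaps hinj
  simp only [Finset.card_range] at hcard
  omega

theorem pvMem_pvDesc_iff (rows : List (List Int)) (hRow : pvRowsOK rows) (u : Nat)
    (hu : u < pvN rows) (hur : pvReach rows u) (x : Nat) :
    x ∈ pvDesc rows u ↔ ∃ k, pvIter rows k x = some u := by
  constructor
  · intro hx
    simp only [pvDesc, Finset.mem_filter] at hx
    obtain ⟨_, k, _, hk⟩ := hx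
    exact ⟨k, hk⟩
  · rintro ⟨k, hk⟩
    have hxlt : x < pvN rows := by
      cases k with
      | zero => simp only [pvIter] at hk; cases hk; exact hu
      | succ k' =>
          simp only [pvIter, pvParN] at hk
          cases hp : pvPar rows x with
          | none => rw [hp] at hk; cases hk
          | some p => exact (pvPar_node_bounds rows hRow x p (by rw [hp])).2
    have hxr : pvReach rows x := by
      obtain ⟨d, hd⟩ := hur
      exact ⟨k + d, by rw [pvIter_add, hk]; simpa using hd⟩
    obtain ⟨d, hdle, hd0⟩ := pvDepth rows hRow x hxlt hxr
    have hkd : k ≤ d := by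
      by_contra hkd
      have : pvIter rows k x = pvIter rows (d + (k - d)) x := by congr 1; omega
      rw [pvIter_add, hd0] at this
      simp only [Option.bind_some] at this
      cases hkd2 : k - d with
      | zero => omega
      | succ m => rw [hkd2, pvIter_zero_succ rows hRow m] at this; rw [this] at hk; cases hk
    simp only [pvDesc, Finset.mem_filter, Finset.mem_range]
    exact ⟨hxlt, k, by omega, hk⟩

-- the common start-of-loop facts shared by the A proof
theorem pvAcyclic (rows : List (List Int)) (hRow : pvRowsOK rows) (u k : Nat)
    (hr : pvReach rows u) (h : pvIter rows k u = some u) : k = 0 := by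
  by_contra hk
  obtain ⟨d, hd⟩ := hr
  have h1 : pvIter rows (d + k) u = none := by
    rw [pvIter_add, hd]
    simp only [Option.bind_some]
    cases k with
    | zero => omega
    | succ k' => exact pvIter_zero_succ rows hRow k'
  have h2 : pvIter rows (k + d) u = some 0 := by
    rw [pvIter_add, h]
    simpa using hd
  rw [Nat.add_comm d k] at h1
  rw [h1] at h2
  cases h2

theorem pvVal_child (rows : List (List Int)) (hRow : pvRowsOK rows) (c s : Nat) (f : Int)
    (hp : pvPar rows c = some (s, f)) (hs : pvReach rows s) (hslt : s < pvN rows) :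
    pvVal rows c = PySem.Int.mod (pvVal rows s * f) pvMod := by
  obtain ⟨d, hdle, hd0⟩ := pvDepth rows hRow s hslt hs
  have hc1 : 1 ≤ c := (pvPar_node_bounds rows hRow c (s, f) hp).1
  obtain ⟨c', rfl⟩ : ∃ c', c = c' + 1 := ⟨c - 1, by omega⟩
  have hn1 : pvN rows = (pvN rows - 1) + 1 := by unfold pvN; omega
  unfold pvVal
  rw [hn1]
  show pvV rows ((pvN rows - 1) + 1) (c' + 1) = _
  simp only [pvV, hp]
  rw [pvV_stable rows d s hd0 (pvN rows - 1) (by omega),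
      ← pvV_stable rows d s hd0 (pvN rows) (by omega), ← hn1]

-- kids ↔ parent
theorem pvMem_kids (rows : List (List Int)) (hRow : pvRowsOK rows)
    (hnd : (rows.map pvTgt).Nodup) (u : Nat) (tf : Int × Int) (h : tf ∈ pvKids rows u) :
    0 ≤ tf.1 ∧ pvPar rows tf.1.toNat = some (u, tf.2) := by
  unfold pvKids at h
  simp only [List.mem_map, List.mem_filter] at h
  obtain ⟨row, ⟨hr, hsrc⟩, rfl⟩ := h
  simp only [beq_iff_eq] at hsrc
  have h1 := (hRow row hr).2.2.2.1
  refine ⟨by omega, ?_⟩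
  unfold pvPar
  have hc : (((pvTgt row).toNat : Nat) : Int) = pvTgt row := by omega
  have : (fun r => pvTgt r == (((pvTgt row).toNat : Nat) : Int)) = (fun r => pvTgt r == pvTgt row) := by
    funext r; rw [hc]
  rw [this, pvFind_eq_of_mem_of_nodup_map pvTgt rows row hnd hr]
  simp [hsrc]

theorem pvPar_mem_kids (rows : List (List Int)) (hRow : pvRowsOK rows) (x u : Nat) (f : Int)
    (hp : pvPar rows x = some (u, f)) : ((x : Int), f) ∈ pvKids rows u := by
  obtain ⟨row, hr, ht, hs, hf⟩ := pvPar_some_elim rows x u f hp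
  have h1 := (hRow row hr).2.1
  have hsrc : pvSrc row = (u : Int) := by omega
  unfold pvKids
  simp only [List.mem_map, List.mem_filter]
  exact ⟨row, ⟨hr, by simp [hsrc]⟩, by rw [ht, hf]⟩

theorem pvMem_pvDescU (rows : List (List Int)) :
    ∀ (st : List Nat) (x : Nat), x ∈ pvDescU rows st ↔ ∃ u ∈ st, x ∈ pvDesc rows u := by
  intro st x
  induction st with
  | nil => simp [pvDescU]
  | cons u us ih => simp [pvDescU, ih]

theorem pvReach_kid (rows : List (List Int)) (c u : Nat) (f : Int)
    (hp : pvPar rows c = some (u, f)) (hur : pvReach rows u) : pvReach rows c := by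
  obtain ⟨d, hd⟩ := hur
  refine ⟨1 + d, ?_⟩
  rw [pvIter_add]
  simp [pvIter, pvParN, hp, hd]

theorem pvIter_one_kid (rows : List (List Int)) (c u : Nat) (f : Int)
    (hp : pvPar rows c = some (u, f)) : pvIter rows 1 c = some u := by
  simp [pvIter, pvParN, hp]

theorem pvChain_eq (rows : List (List Int)) (hRow : pvRowsOK rows) (u c1 c2 x k1 k2 : Nat)
    (f1 f2 : Int) (hur : pvReach rows u)
    (hc1 : pvPar rows c1 = some (u, f1)) (hc2 : pvPar rows c2 = some (u, f2))
    (hk : k1 ≤ k2) (h1 : pvIter rows k1 x = some c1) (h2 : pvIter rows k2 x = some c2) :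
    c1 = c2 := by
  have hm : pvIter rows (k2 - k1) c1 = some c2 := by
    have hh : pvIter rows (k1 + (k2 - k1)) x = some c2 := by
      rw [show k1 + (k2 - k1) = k2 by omega]; exact h2
    rw [pvIter_add, h1] at hh
    simpa using hh
  by_contra hne
  have hmpos : k2 - k1 ≠ 0 := by
    intro h0; rw [h0] at hm; simp [pvIter] at hm; exact hne hm
  set m := k2 - k1 with hmm
  have ha : pvIter rows (m + 1) c1 = some u := by
    rw [pvIter_add, hm]
    simpa using pvIter_one_kid rows c2 u f2 hc2
  have hb : pvIter rows (1 + m) c1 = pvIter rows m u := by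
    rw [pvIter_add, pvIter_one_kid rows c1 u f1 hc1]
    simp
  rw [Nat.add_comm 1 m] at hb
  have : pvIter rows m u = some u := by rw [← hb, ha]
  exact hmpos (pvAcyclic rows hRow u m hur this)

theorem pvDesc_kid_subset (rows : List (List Int)) (hRow : pvRowsOK rows) (u c : Nat) (f : Int)
    (hu : u < pvN rows) (hur : pvReach rows u) (hp : pvPar rows c = some (u, f)) :
    pvDesc rows c ⊆ pvDesc rows u := by
  intro x hx
  have hclt : c < pvN rows := (pvPar_node_bounds rows hRow c (u, f) hp).2
  have hcr : pvReach rows c := pvReach_kid rows c u f hp hur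
  rw [pvMem_pvDesc_iff rows hRow c hclt hcr] at hx
  obtain ⟨k, hk⟩ := hx
  rw [pvMem_pvDesc_iff rows hRow u hu hur]
  refine ⟨k + 1, ?_⟩
  rw [pvIter_add, hk]
  simpa using pvIter_one_kid rows c u f hp

theorem pvNot_mem_desc_kid (rows : List (List Int)) (hRow : pvRowsOK rows) (u c : Nat) (f : Int)
    (_hu : u < pvN rows) (hur : pvReach rows u) (hp : pvPar rows c = some (u, f)) :
    u ∉ pvDesc rows c := by
  have hclt : c < pvN rows := (pvPar_node_bounds rows hRow c (u, f) hp).2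
  have hcr : pvReach rows c := pvReach_kid rows c u f hp hur
  intro hmem
  rw [pvMem_pvDesc_iff rows hRow c hclt hcr] at hmem
  obtain ⟨k, hk⟩ := hmem
  have : pvIter rows (1 + k) c = some c := by
    rw [pvIter_add, pvIter_one_kid rows c u f hp]
    simpa using hk
  have := pvAcyclic rows hRow c (1 + k) hcr this
  omega

theorem pvSibling_disjoint (rows : List (List Int)) (hRow : pvRowsOK rows) (u c1 c2 : Nat)
    (f1 f2 : Int) (hur : pvReach rows u)
    (hc1 : pvPar rows c1 = some (u, f1)) (hc2 : pvPar rows c2 = some (u, f2)) (hne : c1 ≠ c2) :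
    Disjoint (pvDesc rows c1) (pvDesc rows c2) := by
  rw [Finset.disjoint_left]
  intro x hx1 hx2
  have h1lt : c1 < pvN rows := (pvPar_node_bounds rows hRow c1 (u, f1) hc1).2
  have h2lt : c2 < pvN rows := (pvPar_node_bounds rows hRow c2 (u, f2) hc2).2
  have h1r : pvReach rows c1 := pvReach_kid rows c1 u f1 hc1 hur
  have h2r : pvReach rows c2 := pvReach_kid rows c2 u f2 hc2 hur
  rw [pvMem_pvDesc_iff rows hRow c1 h1lt h1r] at hx1
  rw [pvMem_pvDesc_iff rows hRow c2 h2lt h2r] at hx2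
  obtain ⟨k1, hk1⟩ := hx1
  obtain ⟨k2, hk2⟩ := hx2
  rcases Nat.le_total k1 k2 with h | h
  · exact hne (pvChain_eq rows hRow u c1 c2 x k1 k2 f1 f2 hur hc1 hc2 h hk1 hk2)
  · exact hne (pvChain_eq rows hRow u c2 c1 x k2 k1 f2 f1 hur hc2 hc1 h hk2 hk1).symm

theorem pvMem_desc_self (rows : List (List Int)) (u : Nat) (hu : u < pvN rows) :
    u ∈ pvDesc rows u := by
  simp only [pvDesc, Finset.mem_filter, Finset.mem_range]
  exact ⟨hu, 0, by omega, rfl⟩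

-- ===== graph building, port A =====
theorem pvGraphA_general (n : Nat) :
    ∀ (rows' : List (List Int)) (g : List (List (Int × Int))),
      (∀ row ∈ rows', row.length = 3 ∧ 0 ≤ pvSrc row ∧ pvSrc row < (n : Int)) →
      g.length = n →
      (rows'.foldl pvGraphStepA g).length = n ∧
      ∀ u : Nat, u < n → (rows'.foldl pvGraphStepA g).getD u [] =
        g.getD u [] ++ (rows'.filter (fun row => pvSrc row == (u : Int))).map
          (fun row => (pvTgt row, pvFac row)) := by
  intro rows'
  induction rows' with
  | nil => intro g _ hg; exact ⟨hg, fun u hu => by simp⟩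
  | cons row rest ih =>
      intro g hrows hg
      obtain ⟨hlen, hs0, hslt⟩ := hrows row (by simp)
      obtain ⟨a, b, c, rfl⟩ : ∃ a b c, row = [a, b, c] := by
        match row, hlen with
        | [a, b, c], _ => exact ⟨a, b, c, rfl⟩
      have hsrc : pvSrc [a, b, c] = a := rfl
      rw [hsrc] at hs0 hslt
      have hstep : pvGraphStepA g [a, b, c] =
          g.set a.toNat (g.getD a.toNat [] ++ [(b, c)]) := by
        show PySem.List.pySetD g a (PySem.List.pyGetD g a [] ++ [(b, c)]) = _
        rw [PySem.List.pySetD_of_nonneg _ _ hs0,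
            PySem.List.pyGetD_eq_getElem _ _ hs0 (by rw [hg]; exact_mod_cast hslt)]
        congr 1
        rw [List.getD_eq_getElem _ _ (by rw [hg]; omega)]
      have hg1 : (g.set a.toNat (g.getD a.toNat [] ++ [(b, c)])).length = n := by
        simp [hg]
      simp only [List.foldl_cons, hstep]
      obtain ⟨ihl, ihd⟩ := ih _ (fun r hr => hrows r (by simp [hr])) hg1
      refine ⟨ihl, fun u hu => ?_⟩
      rw [ihd u hu]
      rw [List.filter_cons]
      by_cases hua : u = a.toNat
      · subst hua
        have hpa : (pvSrc [a, b, c] == ((a.toNat : Nat) : Int)) = true := by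
          simp only [pvSrc, beq_iff_eq]
          show a = ((a.toNat : Nat) : Int)
          omega
        rw [if_pos hpa]
        simp only [List.map_cons]
        rw [List.getD_eq_getElem _ _ (show a.toNat < (g.set a.toNat (g.getD a.toNat [] ++ [(b, c)])).length by rw [hg1]; omega)]
        rw [List.getElem_set_self (by rw [List.length_set, hg]; omega)]
        rw [List.getD_eq_getElem _ _ (show a.toNat < g.length by rw [hg]; omega)]
        simp
        exact ⟨rfl, rfl⟩
      · have hpa : (pvSrc [a, b, c] == (u : Int)) = false := by
          simp only [pvSrc, beq_eq_false_iff_ne, ne_eq]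
          show ¬ a = (u : Int)
          omega
        rw [if_neg (by simp [hpa])]
        congr 1
        rw [List.getD_eq_getElem _ _ (show u < (g.set a.toNat (g.getD a.toNat [] ++ [(b, c)])).length by rw [hg1]; omega),
            List.getD_eq_getElem _ _ (show u < g.length by rw [hg]; omega),
            List.getElem_set_ne (by omega)]

theorem pvGraphA_getD (rows : List (List Int)) (hRow : pvRowsOK rows) :
    (rows.foldl pvGraphStepA (List.replicate (pvN rows) [])).length = pvN rows ∧
    ∀ u : Nat, u < pvN rows →
      (rows.foldl pvGraphStepA (List.replicate (pvN rows) [])).getD u [] = pvKids rows u := by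
  obtain ⟨hl, hd⟩ := pvGraphA_general (pvN rows) rows (List.replicate (pvN rows) [])
    (fun row hr => ⟨(hRow row hr).1, (hRow row hr).2.1, (hRow row hr).2.2.1⟩)
    (by simp)
  refine ⟨hl, fun u hu => ?_⟩
  rw [hd u hu]
  unfold pvKids
  rw [List.getD_eq_getElem _ _ (by simpa using hu)]
  simp

-- the value written for a kid is its pvVal
theorem pvKid_write (rows : List (List Int)) (hRow : pvRowsOK rows)
    (hnd : (rows.map pvTgt).Nodup) (u : Nat) (hu : u < pvN rows) (hur : pvReach rows u)
    (t f : Int) (htf : (t, f) ∈ pvKids rows u) :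
    PySem.Int.mod (pvVal rows u * f) pvMod = pvVal rows t.toNat := by
  have h := pvMem_kids rows hRow hnd u (t, f) htf
  exact (pvVal_child rows hRow t.toNat u f h.2 hur hu).symm

-- inner loop of port A: write all kids, push them (LIFO)
theorem pvFoldA (rows : List (List Int)) (hRow : pvRowsOK rows)
    (hnd : (rows.map pvTgt).Nodup) (u : Nat) (hu : u < pvN rows) (hur : pvReach rows u)
    (v : Int) (hv : v = pvVal rows u) :
    ∀ (kids : List (Int × Int)), (∀ tf ∈ kids, tf ∈ pvKids rows u) →
    ∀ (r st : List Int), r.length = pvN rows →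
      (kids.foldl (fun (acc : List Int × List Int) tf =>
          (PySem.List.pySetD acc.1 tf.1 (PySem.Int.mod (v * tf.2) pvMod), tf.1 :: acc.2))
        (r, st)).2 = (kids.map (·.1)).reverse ++ st ∧
      (kids.foldl (fun (acc : List Int × List Int) tf =>
          (PySem.List.pySetD acc.1 tf.1 (PySem.Int.mod (v * tf.2) pvMod), tf.1 :: acc.2))
        (r, st)).1.length = pvN rows ∧
      ∀ x : Nat, x < pvN rows →
        (kids.foldl (fun (acc : List Int × List Int) tf =>
            (PySem.List.pySetD acc.1 tf.1 (PySem.Int.mod (v * tf.2) pvMod), tf.1 :: acc.2))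
          (r, st)).1.getD x 0 =
          if ((x : Int) ∈ kids.map (·.1)) then pvVal rows x else r.getD x 0 := by
  intro kids
  induction kids with
  | nil => intro _ r st hr; exact ⟨by simp, hr, fun x hx => by simp⟩
  | cons tf rest ih =>
      intro hk r st hr
      obtain ⟨t, f⟩ := tf
      have htk : (t, f) ∈ pvKids rows u := hk (t, f) (by simp)
      have ht0 : 0 ≤ t := (pvMem_kids rows hRow hnd u (t, f) htk).1
      have hpar := (pvMem_kids rows hRow hnd u (t, f) htk).2
      have htlt : t.toNat < pvN rows := (pvPar_node_bounds rows hRow t.toNat (u, f) hpar).2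
      have hwrite : PySem.Int.mod (v * f) pvMod = pvVal rows t.toNat := by
        rw [hv]; exact pvKid_write rows hRow hnd u hu hur t f htk
      simp only [List.foldl_cons]
      have hset : PySem.List.pySetD r t (PySem.Int.mod (v * f) pvMod)
          = r.set t.toNat (PySem.Int.mod (v * f) pvMod) :=
        PySem.List.pySetD_of_nonneg _ _ ht0
      rw [hset]
      obtain ⟨ih2, ihl, ihd⟩ := ih (fun tf h => hk tf (by simp [h]))
        (r.set t.toNat (PySem.Int.mod (v * f) pvMod)) (t :: st) (by simp [hr])
      refine ⟨by rw [ih2]; simp, ihl, fun x hx => ?_⟩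
      rw [ihd x hx]
      by_cases hx1 : (x : Int) ∈ rest.map (·.1)
      · rw [if_pos hx1, if_pos (by simp [hx1])]
      · rw [if_neg hx1]
        by_cases hx2 : x = t.toNat
        · subst hx2
          rw [if_pos (by simp; left; omega)]
          rw [List.getD_eq_getElem _ _ (by simp [hr]; omega),
              List.getElem_set_self (by simp [hr]; omega), hwrite]
        · have : ¬ ((x : Int) = t) := by omega
          rw [if_neg (by simp [hx1, this])]
          rw [List.getD_eq_getElem _ _ (show x < (r.set t.toNat _).length by simp [hr]; omega),
              List.getElem_set_ne (by omega)]
          exact (List.getD_eq_getElem r 0 (show x < r.length by omega)).symm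

theorem pvDesc_card_le (rows : List (List Int)) (u : Nat) :
    (pvDesc rows u).card ≤ pvN rows := by
  calc (pvDesc rows u).card ≤ (Finset.range (pvN rows)).card :=
        Finset.card_le_card (Finset.filter_subset _ _)
    _ = pvN rows := Finset.card_range _

theorem pvKids_fst_nodup (rows : List (List Int)) (hnd : (rows.map pvTgt).Nodup) (u : Nat) :
    ((pvKids rows u).map (·.1)).Nodup := by
  have h1 : (pvKids rows u).map (·.1) = (rows.filter (fun row => pvSrc row == (u : Int))).map pvTgt := by
    unfold pvKids; rw [List.map_map]; rfl
  have h2 : ((rows.filter (fun row => pvSrc row == (u : Int))).map pvTgt).Sublist (rows.map pvTgt) :=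
    List.filter_sublist.map pvTgt
  exact h1 ▸ hnd.sublist h2

theorem pvKidsN_nodup (rows : List (List Int)) (hRow : pvRowsOK rows)
    (hnd : (rows.map pvTgt).Nodup) (u : Nat) :
    ((pvKids rows u).map (fun tf => tf.1.toNat)).Nodup := by
  have h3 := pvKids_fst_nodup rows hnd u
  have he : (pvKids rows u).map (fun tf => tf.1.toNat) = ((pvKids rows u).map (·.1)).map Int.toNat := by
    rw [List.map_map]; rfl
  rw [he]
  apply List.Nodup.map_on _ h3
  intro x hx y hy hxy
  obtain ⟨tx, htx, rfl⟩ := List.mem_map.mp hx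
  obtain ⟨ty, hty, rfl⟩ := List.mem_map.mp hy
  have h1 := (pvMem_kids rows hRow hnd u tx htx).1
  have h2 := (pvMem_kids rows hRow hnd u ty hty).1
  omega

theorem pvKids_map_cast (rows : List (List Int)) (hRow : pvRowsOK rows)
    (hnd : (rows.map pvTgt).Nodup) (u : Nat) :
    ((pvKids rows u).map (fun tf => tf.1.toNat)).map (fun n : Nat => (n : Int))
      = (pvKids rows u).map (·.1) := by
  rw [List.map_map]
  apply List.map_congr_left
  intro tf htf
  have := (pvMem_kids rows hRow hnd u tf htf).1
  simp only [Function.comp_apply]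
  omega

theorem pvKidsN_mem (rows : List (List Int)) (hRow : pvRowsOK rows)
    (hnd : (rows.map pvTgt).Nodup) (u c : Nat)
    (hc : c ∈ (pvKids rows u).map (fun tf => tf.1.toNat)) :
    ∃ f, pvPar rows c = some (u, f) := by
  obtain ⟨tf, htf, rfl⟩ := List.mem_map.mp hc
  exact ⟨tf.2, (pvMem_kids rows hRow hnd u tf htf).2⟩

theorem pvKidsN_pairwise (rows : List (List Int)) (hRow : pvRowsOK rows)
    (hnd : (rows.map pvTgt).Nodup) (u : Nat) (hur : pvReach rows u) :
    ((pvKids rows u).map (fun tf => tf.1.toNat)).Pairwise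
      (fun a b => Disjoint (pvDesc rows a) (pvDesc rows b)) := by
  have hnod := pvKidsN_nodup rows hRow hnd u
  refine List.Pairwise.imp_of_mem ?_ hnod
  intro a b ha hb hab
  obtain ⟨f1, h1⟩ := pvKidsN_mem rows hRow hnd u a ha
  obtain ⟨f2, h2⟩ := pvKidsN_mem rows hRow hnd u b hb
  exact pvSibling_disjoint rows hRow u a b f1 f2 hur h1 h2 hab

-- condition rewriting for the stack invariant of port A
theorem pvCond_iff (rows : List (List Int)) (hRow : pvRowsOK rows)
    (hnd : (rows.map pvTgt).Nodup) (u : Nat) (stN' : List Nat) (x : Nat) :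
    ((∃ w ∈ u :: stN', ∃ k, 1 ≤ k ∧ pvIter rows k x = some w) ↔
      ((∃ w ∈ (pvKids rows u).map (fun tf => tf.1.toNat) ++ stN',
          ∃ k, 1 ≤ k ∧ pvIter rows k x = some w) ∨
        (x : Int) ∈ (pvKids rows u).map (·.1))) := by
  constructor
  · rintro ⟨w, hw, k, hk1, hk⟩
    rcases List.mem_cons.mp hw with rfl | hw'
    · rcases Nat.lt_or_ge k 2 with hk2 | hk2
      · have hk1' : k = 1 := by omega
        subst hk1'
        right
        simp only [pvIter, pvParN] at hk
        cases hp : pvPar rows x with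
        | none => rw [hp] at hk; cases hk
        | some p =>
            rw [hp] at hk
            simp only [Option.map_some, Option.bind_some] at hk
            obtain ⟨s, f⟩ := p
            obtain rfl : s = w := by simpa using hk
            have := pvPar_mem_kids rows hRow x s f hp
            exact List.mem_map.mpr ⟨((x : Int), f), this, rfl⟩
      · left
        have hsplit : pvIter rows ((k - 1) + 1) x = some w := by
          rw [show (k - 1) + 1 = k by omega]; exact hk
        rw [pvIter_add] at hsplit
        cases hmid : pvIter rows (k - 1) x with
        | none => rw [hmid] at hsplit; cases hsplit
        | some c =>
            rw [hmid] at hsplit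
            simp only [Option.bind_some] at hsplit
            simp only [pvIter, pvParN] at hsplit
            cases hp : pvPar rows c with
            | none => rw [hp] at hsplit; cases hsplit
            | some p =>
                rw [hp] at hsplit
                simp only [Option.map_some, Option.bind_some] at hsplit
                obtain ⟨s, f⟩ := p
                obtain rfl : s = w := by simpa using hsplit
                have hmem := pvPar_mem_kids rows hRow c s f hp
                refine ⟨c, List.mem_append.mpr (Or.inl ?_), k - 1, by omega, hmid⟩
                refine List.mem_map.mpr ⟨((c : Int), f), hmem, by simp⟩
    · exact Or.inl ⟨w, List.mem_append.mpr (Or.inr hw'), k, hk1, hk⟩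
  · rintro (⟨w, hw, k, hk1, hk⟩ | hx)
    · rcases List.mem_append.mp hw with hw' | hw'
      · obtain ⟨f, hp⟩ := pvKidsN_mem rows hRow hnd u w hw'
        refine ⟨u, by simp, k + 1, by omega, ?_⟩
        rw [pvIter_add, hk]
        simpa using pvIter_one_kid rows w u f hp
      · exact ⟨w, by simp [hw'], k, hk1, hk⟩
    · obtain ⟨tf, htf, hfst⟩ := List.mem_map.mp hx
      have hp := (pvMem_kids rows hRow hnd u tf htf).2
      have h0 := (pvMem_kids rows hRow hnd u tf htf).1
      have hxx : tf.1.toNat = x := by omega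
      rw [hxx] at hp
      exact ⟨u, by simp, 1, by omega, pvIter_one_kid rows x u tf.2 hp⟩

theorem pvLoopA_spec (rows : List (List Int)) (hRow : pvRowsOK rows)
    (hnd : (rows.map pvTgt).Nodup) (g : List (List (Int × Int)))
    (hg : ∀ u : Nat, u < pvN rows → g.getD u [] = pvKids rows u) :
    ∀ (fuel : Nat) (stN : List Nat) (r : List Int),
      r.length = pvN rows →
      (∀ u ∈ stN, u < pvN rows ∧ pvReach rows u ∧ r.getD u 0 = pvVal rows u) →
      stN.Pairwise (fun a b => Disjoint (pvDesc rows a) (pvDesc rows b)) →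
      (pvDescU rows stN).card ≤ fuel →
      (pvLoopA g fuel (stN.map (fun u : Nat => (u : Int))) r).length = pvN rows ∧
      ∀ x : Nat, x < pvN rows →
        ((∃ u ∈ stN, ∃ k, 1 ≤ k ∧ pvIter rows k x = some u) →
            (pvLoopA g fuel (stN.map (fun u : Nat => (u : Int))) r).getD x 0 = pvVal rows x) ∧
        (¬ (∃ u ∈ stN, ∃ k, 1 ≤ k ∧ pvIter rows k x = some u) →
            (pvLoopA g fuel (stN.map (fun u : Nat => (u : Int))) r).getD x 0 = r.getD x 0) := by
  intro fuel
  induction fuel with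
  | zero =>
      intro stN r hr hst hpw hcard
      cases stN with
      | nil =>
          refine ⟨by simpa [pvLoopA] using hr, fun x hx => ⟨?_, fun _ => by simp [pvLoopA]⟩⟩
          rintro ⟨u, hu, -⟩
          exact absurd hu (List.not_mem_nil)
      | cons u us =>
          exfalso
          have hmem : u ∈ pvDescU rows (u :: us) :=
            (pvMem_pvDescU rows (u :: us) u).mpr
              ⟨u, by simp, pvMem_desc_self rows u (hst u (by simp)).1⟩
          have : (pvDescU rows (u :: us)).card = 0 := by omega
          rw [Finset.card_eq_zero] at this
          rw [this] at hmem
          exact absurd hmem (Finset.notMem_empty u)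
  | succ fuel ih =>
      intro stN r hr hst hpw hcard
      cases stN with
      | nil =>
          refine ⟨by simpa [pvLoopA] using hr, fun x hx => ⟨?_, fun _ => by simp [pvLoopA]⟩⟩
          rintro ⟨u, hu, -⟩
          exact absurd hu (List.not_mem_nil)
      | cons un stN' =>
          obtain ⟨hun, hur, hrv⟩ := hst un (by simp)
          simp only [List.map_cons, pvLoopA]
          have hkid : PySem.List.pyGetD g ((un : Nat) : Int) [] = pvKids rows un := by
            rw [PySem.List.pyGetD_natCast]; exact hg un hun
          have hv : PySem.List.pyGetD r ((un : Nat) : Int) 0 = pvVal rows un := by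
            rw [PySem.List.pyGetD_natCast]; exact hrv
          rw [hkid, hv]
          obtain ⟨hf2, hfl, hfd⟩ := pvFoldA rows hRow hnd un hun hur (pvVal rows un) rfl
            (pvKids rows un) (fun tf h => h) r (stN'.map (fun u : Nat => (u : Int))) hr
          set kidsN := (pvKids rows un).map (fun tf => tf.1.toNat) with hkN
          have hcast : ((pvKids rows un).map (·.1)).reverse ++ stN'.map (fun u : Nat => (u : Int))
              = (kidsN.reverse ++ stN').map (fun u : Nat => (u : Int)) := by
            rw [List.map_append, List.map_reverse, hkN, pvKids_map_cast rows hRow hnd un]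
          rw [hcast] at hf2
          rw [hf2]
          have hkprop : ∀ c ∈ kidsN, c < pvN rows ∧ pvReach rows c ∧ (c : Int) ∈ (pvKids rows un).map (·.1) := by
            intro c hc
            obtain ⟨f, hp⟩ := pvKidsN_mem rows hRow hnd un c hc
            refine ⟨(pvPar_node_bounds rows hRow c (un, f) hp).2,
                    pvReach_kid rows c un f hp hur, ?_⟩
            rw [← pvKids_map_cast rows hRow hnd un]
            exact List.mem_map.mpr ⟨c, hc, rfl⟩
          have harg2 : ∀ u ∈ kidsN.reverse ++ stN',
              u < pvN rows ∧ pvReach rows u ∧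
              (List.foldl (fun (acc : List Int × List Int) tf =>
                  (PySem.List.pySetD acc.1 tf.1 (PySem.Int.mod (pvVal rows un * tf.2) pvMod),
                   tf.1 :: acc.2)) (r, stN'.map (fun u : Nat => (u : Int))) (pvKids rows un)).1.getD u 0
                = pvVal rows u := by
            intro u hu
            rcases List.mem_append.mp hu with hu' | hu'
            · rw [List.mem_reverse] at hu'
              obtain ⟨hlt, hre, hmem⟩ := hkprop u hu'
              exact ⟨hlt, hre, by rw [hfd u hlt, if_pos hmem]⟩
            · obtain ⟨hlt, hre, hval⟩ := hst u (by simp [hu'])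
              refine ⟨hlt, hre, ?_⟩
              rw [hfd u hlt]
              by_cases hmem : (u : Int) ∈ (pvKids rows un).map (·.1)
              · rw [if_pos hmem]
              · rw [if_neg hmem]; exact hval
          have hsub : ∀ c ∈ kidsN, pvDesc rows c ⊆ pvDesc rows un := by
            intro c hc
            obtain ⟨f, hp⟩ := pvKidsN_mem rows hRow hnd un c hc
            exact pvDesc_kid_subset rows hRow un c f hun hur hp
          have hnotu : ∀ c ∈ kidsN, un ∉ pvDesc rows c := by
            intro c hc
            obtain ⟨f, hp⟩ := pvKidsN_mem rows hRow hnd un c hc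
            exact pvNot_mem_desc_kid rows hRow un c f hun hur hp
          have hpw_head : ∀ b ∈ stN', Disjoint (pvDesc rows un) (pvDesc rows b) :=
            (List.pairwise_cons.mp hpw).1
          have hpw2 : (kidsN.reverse ++ stN').Pairwise
              (fun a b => Disjoint (pvDesc rows a) (pvDesc rows b)) := by
            rw [List.pairwise_append]
            refine ⟨?_, (List.pairwise_cons.mp hpw).2, ?_⟩
            · rw [List.pairwise_reverse]
              exact (pvKidsN_pairwise rows hRow hnd un hur).imp fun h => h.symm
            · intro a ha b hb
              rw [List.mem_reverse] at ha
              exact Finset.disjoint_of_subset_left (hsub a ha) (hpw_head b hb)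
          have hcard2 : (pvDescU rows (kidsN.reverse ++ stN')).card ≤ fuel := by
            have hsubU : pvDescU rows (kidsN.reverse ++ stN')
                ⊆ (pvDescU rows (un :: stN')).erase un := by
              intro x hx
              obtain ⟨w, hw, hxw⟩ := (pvMem_pvDescU rows _ x).mp hx
              rcases List.mem_append.mp hw with hw' | hw'
              · rw [List.mem_reverse] at hw'
                refine Finset.mem_erase.mpr ⟨?_, ?_⟩
                · intro hxu; subst hxu; exact hnotu w hw' hxw
                · exact (pvMem_pvDescU rows _ x).mpr ⟨un, by simp, hsub w hw' hxw⟩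
              · refine Finset.mem_erase.mpr ⟨?_, ?_⟩
                · intro hxu; subst hxu
                  exact (Finset.disjoint_left.mp (hpw_head w hw'))
                    (pvMem_desc_self rows x hun) hxw
                · exact (pvMem_pvDescU rows _ x).mpr ⟨w, by simp [hw'], hxw⟩
            have hmemu : un ∈ pvDescU rows (un :: stN') :=
              (pvMem_pvDescU rows _ un).mpr ⟨un, by simp, pvMem_desc_self rows un hun⟩
            have := Finset.card_le_card hsubU
            rw [Finset.card_erase_of_mem hmemu] at this
            omega
          obtain ⟨ihl, ihd⟩ := ih (kidsN.reverse ++ stN') _ hfl harg2 hpw2 hcard2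
          refine ⟨ihl, fun x hx => ?_⟩
          have hcond := pvCond_iff rows hRow hnd un stN' x
          have hrev : (∃ u ∈ kidsN.reverse ++ stN', ∃ k, 1 ≤ k ∧ pvIter rows k x = some u) ↔
               (∃ u ∈ kidsN ++ stN', ∃ k, 1 ≤ k ∧ pvIter rows k x = some u) := by
            constructor <;> rintro ⟨w, hw, hk⟩ <;> rcases List.mem_append.mp hw with hw' | hw'
            · exact ⟨w, List.mem_append.mpr (Or.inl (List.mem_reverse.mp hw')), hk⟩
            · exact ⟨w, List.mem_append.mpr (Or.inr hw'), hk⟩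
            · exact ⟨w, List.mem_append.mpr (Or.inl (List.mem_reverse.mpr hw')), hk⟩
            · exact ⟨w, List.mem_append.mpr (Or.inr hw'), hk⟩
          constructor
          · intro hc1
            rcases hcond.mp hc1 with hl | hxk
            · exact (ihd x hx).1 (hrev.mpr hl)
            · by_cases hc2 : ∃ u ∈ kidsN.reverse ++ stN', ∃ k, 1 ≤ k ∧ pvIter rows k x = some u
              · exact (ihd x hx).1 hc2
              · rw [(ihd x hx).2 hc2, hfd x hx, if_pos hxk]
          · intro hc1
            have hc2 : ¬ ∃ u ∈ kidsN.reverse ++ stN', ∃ k, 1 ≤ k ∧ pvIter rows k x = some u := by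
              intro h
              exact hc1 (hcond.mpr (Or.inl (hrev.mp h)))
            have hxk : ¬ (x : Int) ∈ (pvKids rows un).map (·.1) := by
              intro h
              exact hc1 (hcond.mpr (Or.inr h))
            rw [(ihd x hx).2 hc2, hfd x hx, if_neg hxk]

theorem pvPre_rowsOK (rows : List (List Int))
    (hsh : ∀ row ∈ rows, row.length = 3 ∧
      -((rows.length : Int) + 1) ≤ row.getD 0 0 ∧ row.getD 0 0 < (rows.length : Int) + 1)
    (h2 : (∀ row ∈ rows, 0 ≤ row.getD 0 0 ∧
       1 ≤ row.getD 1 0 ∧ row.getD 1 0 < (rows.length : Int) + 1)) :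
    pvRowsOK rows := by
  intro row hr
  obtain ⟨hl, _, hlt⟩ := hsh row hr
  obtain ⟨hs0, ht1, htlt⟩ := h2 row hr
  have hc : ((pvN rows : Nat) : Int) = (rows.length : Int) + 1 := by
    unfold pvN; push_cast; ring
  exact ⟨hl, hs0, by rw [hc]; exact hlt, ht1, by rw [hc]; exact htlt⟩

-- the common start-of-loop facts and the final value of each cell
theorem pvR0_getD (n : Nat) (hn : 0 < n) (x : Nat) (hx : x < n) :
    ((List.replicate n (0 : Int)).set 0 1).getD x 0 = if x = 0 then 1 else 0 := by
  rw [List.getD_eq_getElem _ _ (by simpa using hx)]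
  by_cases h : x = 0
  · subst h; rw [List.getElem_set_self (by simpa using hn)]; simp
  · rw [List.getElem_set_ne (by omega)]
    simp [List.getElem_replicate, h]

theorem pvStart_r0 (rows : List (List Int)) :
    ∀ u ∈ ([0] : List Nat), u < pvN rows ∧ pvReach rows u ∧
      ((List.replicate (pvN rows) (0 : Int)).set 0 1).getD u 0 = pvVal rows u := by
  intro u hu
  have hu0 : u = 0 := by simpa using hu
  subst hu0
  have hn : 0 < pvN rows := by unfold pvN; omega
  refine ⟨hn, ⟨0, rfl⟩, ?_⟩
  rw [pvR0_getD (pvN rows) hn 0 hn, if_pos rfl]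
  unfold pvVal
  rw [pvV_zero]

theorem pvStart_card (rows : List (List Int)) :
    (pvDescU rows [0]).card ≤ pvN rows := by
  have : pvDescU rows [0] = pvDesc rows 0 := by simp [pvDescU]
  rw [this]
  exact pvDesc_card_le rows 0

-- outside the root's proper descendants, the initial cell already holds pvVal
theorem pvElse_val (rows : List (List Int)) (x : Nat) (hx : x < pvN rows)
    (h : ¬ (∃ u ∈ ([0] : List Nat), ∃ k, 1 ≤ k ∧ pvIter rows k x = some u)) :
    ((List.replicate (pvN rows) (0 : Int)).set 0 1).getD x 0 = pvVal rows x := by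
  have hn : 0 < pvN rows := by unfold pvN; omega
  rw [pvR0_getD (pvN rows) hn x hx]
  by_cases hx0 : x = 0
  · subst hx0
    rw [if_pos rfl]
    unfold pvVal
    rw [pvV_zero]
  · rw [if_neg hx0]
    have hnr : ¬ pvReach rows x := by
      rintro ⟨d, hd⟩
      cases d with
      | zero => simp only [pvIter] at hd; exact hx0 (by simpa using hd)
      | succ d' => exact h ⟨0, by simp, d' + 1, by omega, hd⟩
    unfold pvVal
    rw [pvV_unreach rows (pvN rows) x hnr]

theorem pvStack0 : ([(0 : Int)]) = ([0] : List Nat).map (fun u : Nat => (u : Int)) := by simp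

-- port A computes pvVal on every cell
theorem pvPortA_val (rows : List (List Int)) (hRow : pvRowsOK rows)
    (hnd : (rows.map pvTgt).Nodup) :
    (baseUnitConversions rows).length = pvN rows ∧
    ∀ x : Nat, x < pvN rows → (baseUnitConversions rows).getD x 0 = pvVal rows x := by
  obtain ⟨hgl, hgd⟩ := pvGraphA_getD rows hRow
  have hshow : baseUnitConversions rows =
      pvLoopA (rows.foldl pvGraphStepA (List.replicate (pvN rows) []))
        (pvN rows) (([0] : List Nat).map (fun u : Nat => (u : Int)))
        ((List.replicate (pvN rows) (0 : Int)).set 0 1) := by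
    rw [← pvStack0]; rfl
  obtain ⟨hl, hd⟩ := pvLoopA_spec rows hRow hnd _ hgd (pvN rows) [0]
    ((List.replicate (pvN rows) (0 : Int)).set 0 1)
    (by simp) (pvStart_r0 rows) (by simp) (pvStart_card rows)
  rw [hshow]
  refine ⟨hl, fun x hx => ?_⟩
  by_cases h : ∃ u ∈ ([0] : List Nat), ∃ k, 1 ≤ k ∧ pvIter rows k x = some u
  · exact (hd x hx).1 h
  · rw [(hd x hx).2 h]
    exact pvElse_val rows x hx h

-- ===== the B side: the parent dict and the bounded upward walk =====

-- the dict comprehension, canonically: a fold of inserts over the mapped rows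
theorem pvParB_canon :
    ∀ (rows' : List (List Int)) (d : PySem.Dict Int (Int × Int)),
      (∀ row ∈ rows', row.length = 3) →
      rows'.foldl pvParStepB d =
        (rows'.map (fun row => (pvTgt row, (pvSrc row, pvFac row)))).foldl
          (fun d p => d.insert p.1 p.2) d := by
  intro rows'
  induction rows' with
  | nil => intro d _; rfl
  | cons row rest ih =>
      intro d hrows
      obtain ⟨a, b, c, rfl⟩ : ∃ a b c, row = [a, b, c] := by
        match row, hrows row (by simp) with
        | [a, b, c], _ => exact ⟨a, b, c, rfl⟩
      simp only [List.foldl_cons, List.map_cons]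
      rw [ih _ (fun r hr => hrows r (by simp [hr]))]
      rfl

-- with distinct targets, the dict's items are exactly the mapped rows
theorem pvParB_items (rows : List (List Int))
    (hsh : ∀ row ∈ rows, row.length = 3) (hnd : (rows.map pvTgt).Nodup) :
    (rows.foldl pvParStepB PySem.Dict.empty).items
      = rows.map (fun row => (pvTgt row, (pvSrc row, pvFac row))) := by
  rw [pvParB_canon rows PySem.Dict.empty hsh]
  have := PySem.Dict.items_foldl_insert_fresh
    (l := rows.map (fun row => (pvTgt row, (pvSrc row, pvFac row))))
    (d := PySem.Dict.empty) (k := Prod.fst) (v := Prod.snd)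
    (by intro a _; exact PySem.Dict.contains_empty _)
    (by rw [List.map_map]; simpa using hnd)
  simpa using this

theorem pvParB_keys_nodup (rows : List (List Int))
    (hsh : ∀ row ∈ rows, row.length = 3) (hnd : (rows.map pvTgt).Nodup) :
    (rows.foldl pvParStepB PySem.Dict.empty).keys.Nodup := by
  have hk : (rows.foldl pvParStepB PySem.Dict.empty).keys
      = (rows.map (fun row => (pvTgt row, (pvSrc row, pvFac row)))).map (·.1) := by
    simp only [PySem.Dict.keys, pvParB_items rows hsh hnd]
  rw [hk, List.map_map]
  simpa using hnd

-- dict lookup agrees with pvPar (sources nonnegative under rowsOK)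
theorem pvParB_get (rows : List (List Int)) (hRow : pvRowsOK rows)
    (hnd : (rows.map pvTgt).Nodup) (x : Nat) :
    (rows.foldl pvParStepB PySem.Dict.empty).get? ((x : Nat) : Int)
      = (pvPar rows x).map (fun p => ((p.1 : Int), p.2)) := by
  have hsh : ∀ row ∈ rows, row.length = 3 := fun row hr => (hRow row hr).1
  cases hf : rows.find? (fun row => pvTgt row == (x : Int)) with
  | some row =>
      have hr : row ∈ rows := List.mem_of_find?_eq_some hf
      have ht : pvTgt row = (x : Int) := by simpa using List.find?_some hf
      have hmem : ((x : Int), (pvSrc row, pvFac row))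
          ∈ (rows.foldl pvParStepB PySem.Dict.empty).items := by
        rw [pvParB_items rows hsh hnd]
        exact List.mem_map.mpr ⟨row, hr, by rw [ht]⟩
      rw [PySem.Dict.get?_of_mem_items _ hmem (pvParB_keys_nodup rows hsh hnd)]
      have hs0 := (hRow row hr).2.1
      unfold pvPar
      rw [hf]
      simp only [Option.map_some]
      congr 2
      omega
  | none =>
      have hnk : ((x : Nat) : Int) ∉ (rows.foldl pvParStepB PySem.Dict.empty).keys := by
        simp only [PySem.Dict.keys, pvParB_items rows hsh hnd, List.map_map]
        intro hmem
        obtain ⟨row, hr, hrx⟩ := List.mem_map.mp hmem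
        have hne := List.find?_eq_none.mp hf row hr
        simp only [beq_iff_eq] at hne
        exact hne hrx
      rw [(PySem.Dict.get?_eq_none_iff_not_mem_keys _ _).mpr hnk]
      unfold pvPar
      rw [hf]
      rfl

theorem pvModZeroMul (f : Int) : PySem.Int.mod (0 * f) pvMod = 0 := by
  rw [Int.zero_mul, PySem.Int.mod_eq_emod_of_pos pvMod_pos]
  rfl

-- walk accumulator lemma
theorem pvWalkB_acc (d : PySem.Dict Int (Int × Int)) :
    ∀ (k : Nat) (u : Int) (path : List Int),
      pvWalkB d k u path = (pvWalkB d k u []).map (fun p => (p.1, path ++ p.2)) := by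
  intro k
  induction k with
  | zero => intro u path; simp [pvWalkB]
  | succ k ih =>
      intro u path
      simp only [pvWalkB]
      by_cases hu : u = 0
      · simp [hu]
      · rw [if_neg hu, if_neg hu]
        cases hg : d.get? u with
        | none => rfl
        | some p =>
            obtain ⟨s, f⟩ := p
            simp only [List.nil_append]
            rw [ih s (path ++ [f]), ih s [f]]
            cases pvWalkB d k s [] with
            | none => rfl
            | some q => simp

-- B's factor equals the fuelled chain value, given dict–pvPar agreement
theorem pvFactorB_eq_pvV (rows : List (List Int)) (d : PySem.Dict Int (Int × Int))
    (hd : ∀ x : Nat, d.get? ((x : Nat) : Int) = (pvPar rows x).map (fun p => ((p.1 : Int), p.2))) :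
    ∀ (fuel : Nat) (x : Nat), pvFactorB d fuel ((x : Nat) : Int) = pvV rows fuel x := by
  intro fuel
  induction fuel with
  | zero =>
      intro x
      cases x with
      | zero => rfl
      | succ y => rfl
  | succ fuel ih =>
      intro x
      cases x with
      | zero => rfl
      | succ y =>
          have hx0 : ¬ (((y + 1 : Nat) : Int) = 0) := by omega
          unfold pvFactorB
          simp only [pvWalkB, if_neg hx0, hd (y + 1)]
          cases hp : pvPar rows (y + 1) with
          | none => simp [pvV, hp]
          | some p =>
              obtain ⟨s, f⟩ := p
              simp only [Option.map_some, List.nil_append, pvV, hp]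
              rw [pvWalkB_acc d fuel ((s : Nat) : Int) [f]]
              have ihs := ih s
              unfold pvFactorB at ihs
              cases hw : pvWalkB d fuel ((s : Nat) : Int) [] with
              | none =>
                  rw [hw] at ihs
                  simp only [Option.map_none] at ihs ⊢
                  rw [← ihs, pvModZeroMul]
              | some q =>
                  obtain ⟨u', p'⟩ := q
                  rw [hw] at ihs
                  simp only [Option.map_some] at ihs ⊢
                  by_cases hu' : u' = 0
                  · subst hu'
                    simp only [ne_eq, not_true_eq_false, if_false] at ihs ⊢
                    rw [List.reverse_append, List.reverse_singleton, List.foldl_append, ihs]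
                    rfl
                  · rw [if_pos hu'] at ihs
                    rw [if_pos hu', ← ihs, pvModZeroMul]

-- port B computes pvVal on every cell
theorem pvPortB_val (rows : List (List Int)) (hRow : pvRowsOK rows)
    (hnd : (rows.map pvTgt).Nodup) :
    (baseUnitConversions_alt rows).length = pvN rows ∧
    ∀ x : Nat, x < pvN rows → (baseUnitConversions_alt rows).getD x 0 = pvVal rows x := by
  have hdagree := pvParB_get rows hRow hnd
  have hF := pvFactorB_eq_pvV rows (rows.foldl pvParStepB PySem.Dict.empty) hdagree
  have hshow : baseUnitConversions_alt rows
      = (PySem.List.pyRange 0 ((rows.length + 1 : Nat) : Int) 1).map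
          (pvFactorB (rows.foldl pvParStepB PySem.Dict.empty) (rows.length + 1)) := rfl
  rw [hshow]
  have hlen : ((PySem.List.pyRange 0 ((rows.length + 1 : Nat) : Int) 1).map
      (pvFactorB (rows.foldl pvParStepB PySem.Dict.empty) (rows.length + 1))).length = pvN rows := by
    rw [List.length_map, PySem.List.length_pyRange_one]
    unfold pvN
    omega
  refine ⟨hlen, fun x hx => ?_⟩
  rw [List.getD_eq_getElem _ _ (by rw [hlen]; exact hx), List.getElem_map,
      PySem.List.getElem_pyRange_one]
  simp only [zero_add]
  rw [hF (rows.length + 1) x]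
  rfl

-- ===== the no-edge-out-of-0 branch of Pre_: both programs return [1, 0, …, 0] =====
theorem pvLoopA_nil (g : List (List (Int × Int))) (fuel : Nat) (r : List Int) :
    pvLoopA g fuel [] r = r := by
  cases fuel <;> rfl

theorem pvSetD_preserve_zero (g : List (List (Int × Int))) (s : Int) (v : List (Int × Int))
    (h1 : -(g.length : Int) ≤ s) (h2 : s < g.length) (h3 : s ≠ 0) (h4 : s ≠ -(g.length : Int)) :
    (PySem.List.pySetD g s v).getD 0 [] = g.getD 0 [] := by
  simp only [PySem.List.pySetD, PySem.List.pySet?, PySem.List.pyIdx?]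
  by_cases hs : 0 ≤ s
  · rw [if_pos hs, if_pos h2]
    simp only [Option.map_some, Option.getD_some]
    rw [List.getD_eq_getElem?_getD, List.getD_eq_getElem?_getD,
        List.getElem?_set_ne (by omega)]
  · rw [if_neg hs, if_pos (by omega)]
    simp only [Option.map_some, Option.getD_some]
    rw [List.getD_eq_getElem?_getD, List.getD_eq_getElem?_getD,
        List.getElem?_set_ne (by omega)]

theorem pvGraphA_zero (n : Nat) :
    ∀ (rows' : List (List Int)) (g : List (List (Int × Int))),
      (∀ row ∈ rows', row.length = 3 ∧
        -(n : Int) ≤ pvSrc row ∧ pvSrc row < (n : Int) ∧ pvSrc row ≠ 0 ∧ pvSrc row ≠ -(n : Int)) →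
      g.length = n →
      (rows'.foldl pvGraphStepA g).getD 0 [] = g.getD 0 [] := by
  intro rows'
  induction rows' with
  | nil => intro g _ _; rfl
  | cons row rest ih =>
      intro g hrows hg
      obtain ⟨hlen, ha, hb, hc, hd⟩ := hrows row (by simp)
      obtain ⟨a, b, c, rfl⟩ : ∃ a b c, row = [a, b, c] := by
        match row, hlen with
        | [a, b, c], _ => exact ⟨a, b, c, rfl⟩
      have hsrc : pvSrc [a, b, c] = a := rfl
      rw [hsrc] at ha hb hc hd
      simp only [List.foldl_cons]
      show (List.foldl pvGraphStepA
        (PySem.List.pySetD g a (PySem.List.pyGetD g a [] ++ [(b, c)])) rest).getD 0 [] = _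
      rw [ih _ (fun r hr => hrows r (by simp [hr]))
            (by rw [PySem.List.length_pySetD]; exact hg)]
      exact pvSetD_preserve_zero g a _ (by rw [hg]; exact ha) (by rw [hg]; exact hb)
        hc (by rw [hg]; exact hd)

theorem pvQuiet_A (rows : List (List Int))
    (hsh : ∀ row ∈ rows, row.length = 3 ∧
      -((rows.length : Int) + 1) ≤ row.getD 0 0 ∧ row.getD 0 0 < (rows.length : Int) + 1)
    (h0 : ∀ row ∈ rows, row.getD 0 0 ≠ 0 ∧ row.getD 0 0 ≠ -((rows.length : Int) + 1)) :
    baseUnitConversions rows = (List.replicate (rows.length + 1) (0 : Int)).set 0 1 := by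
  have hn : ((rows.length + 1 : Nat) : Int) = (rows.length : Int) + 1 := by push_cast; ring
  have hg0 : (rows.foldl pvGraphStepA (List.replicate (rows.length + 1) [])).getD 0 [] = [] := by
    rw [pvGraphA_zero (rows.length + 1) rows _ ?_ (by simp)]
    · rw [List.getD_eq_getElem _ _ (by simp)]
      simp
    · intro row hr
      obtain ⟨h1, h2, h3⟩ := hsh row hr
      obtain ⟨h4, h5⟩ := h0 row hr
      exact ⟨h1, by rw [hn]; exact h2, by rw [hn]; exact h3, h4, by rw [hn]; exact h5⟩
  show pvLoopA (rows.foldl pvGraphStepA (List.replicate (rows.length + 1) []))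
      (rows.length + 1) [(0 : Int)] ((List.replicate (rows.length + 1) (0 : Int)).set 0 1) = _
  simp only [pvLoopA]
  rw [show PySem.List.pyGetD (rows.foldl pvGraphStepA (List.replicate (rows.length + 1) [])) (0 : Int) []
        = [] by rw [PySem.List.pyGetD_zero]; exact hg0]
  simp only [List.foldl_nil]
  exact pvLoopA_nil _ _ _

-- in the quiet branch, every stored parent has a nonzero source
theorem pvParB_mem_src (rows : List (List Int))
    (hsh : ∀ row ∈ rows, row.length = 3) :
    ∀ p ∈ (rows.foldl pvParStepB PySem.Dict.empty).items,
      ∃ row ∈ rows, p = (pvTgt row, (pvSrc row, pvFac row)) := by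
  have hgen : ∀ (rows' : List (List Int)), (∀ row ∈ rows', row.length = 3) →
      ∀ (d : PySem.Dict Int (Int × Int)), ∀ p ∈ (rows'.foldl pvParStepB d).items,
        p ∈ d.items ∨ ∃ row ∈ rows', p = (pvTgt row, (pvSrc row, pvFac row)) := by
    intro rows'
    induction rows' with
    | nil => intro _ d p hp; exact Or.inl hp
    | cons row rest ih =>
        intro hsh' d p hp
        obtain ⟨a, b, c, rfl⟩ : ∃ a b c, row = [a, b, c] := by
          match row, hsh' row (by simp) with
          | [a, b, c], _ => exact ⟨a, b, c, rfl⟩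
        simp only [List.foldl_cons] at hp
        rcases ih (fun r hr => hsh' r (by simp [hr])) (d.insert b (a, c)) p hp with h | h
        · rcases (PySem.Dict.mem_items_insert _ _ _ _).mp h with h1 | h1
          · exact Or.inr ⟨[a, b, c], by simp, by simpa [pvTgt, pvSrc, pvFac] using h1⟩
          · exact Or.inl h1.1
        · obtain ⟨r, hr, hpr⟩ := h
          exact Or.inr ⟨r, by simp [hr], hpr⟩
  intro p hp
  rcases hgen rows hsh PySem.Dict.empty p hp with h | h
  · simp [PySem.Dict.empty] at h
  · exact h

-- a walk whose every stored parent is nonzero never reaches 0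
theorem pvWalkB_stay (d : PySem.Dict Int (Int × Int))
    (hsrc : ∀ u s f, d.get? u = some (s, f) → s ≠ 0) :
    ∀ (k : Nat) (u : Int) (path : List Int), u ≠ 0 →
      pvWalkB d k u path = none ∨
        ∃ u' p', pvWalkB d k u path = some (u', p') ∧ u' ≠ 0 := by
  intro k
  induction k with
  | zero => intro u path hu; exact Or.inr ⟨u, path, rfl, hu⟩
  | succ k ih =>
      intro u path hu
      simp only [pvWalkB, if_neg hu]
      cases hg : d.get? u with
      | none => exact Or.inl rfl
      | some p =>
          obtain ⟨s, f⟩ := p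
          exact ih s (path ++ [f]) (hsrc u s f hg)

theorem pvFactorB_zero_of (d : PySem.Dict Int (Int × Int))
    (hsrc : ∀ u s f, d.get? u = some (s, f) → s ≠ 0)
    (k : Nat) (u : Int) (hu : u ≠ 0) : pvFactorB d k u = 0 := by
  unfold pvFactorB
  rcases pvWalkB_stay d hsrc k u [] hu with h | ⟨u', p', h, hu'⟩
  · rw [h]
  · rw [h]
    simp [hu']

theorem pvFactorB_root (d : PySem.Dict Int (Int × Int)) (k : Nat) :
    pvFactorB d k 0 = 1 := by
  cases k <;> simp [pvFactorB, pvWalkB]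

theorem pvQuiet_B (rows : List (List Int))
    (hsh : ∀ row ∈ rows, row.length = 3)
    (h0 : ∀ row ∈ rows, row.getD 0 0 ≠ 0) :
    baseUnitConversions_alt rows = (List.replicate (rows.length + 1) (0 : Int)).set 0 1 := by
  have hsrc : ∀ u s f, (rows.foldl pvParStepB PySem.Dict.empty).get? u = some (s, f) → s ≠ 0 := by
    intro u s f hg
    obtain ⟨row, hr, heq⟩ :=
      pvParB_mem_src rows hsh (u, (s, f)) (PySem.Dict.mem_items_of_get?_eq_some _ hg)
    have hs : s = pvSrc row := congrArg (fun p => p.2.1) heq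
    rw [hs]
    exact h0 row hr
  have hshow : baseUnitConversions_alt rows
      = (PySem.List.pyRange 0 ((rows.length + 1 : Nat) : Int) 1).map
          (pvFactorB (rows.foldl pvParStepB PySem.Dict.empty) (rows.length + 1)) := rfl
  rw [hshow]
  have hlen : ((PySem.List.pyRange 0 ((rows.length + 1 : Nat) : Int) 1).map
      (pvFactorB (rows.foldl pvParStepB PySem.Dict.empty) (rows.length + 1))).length
      = rows.length + 1 := by
    rw [List.length_map, PySem.List.length_pyRange_one]
    omega
  apply List.ext_getElem (by rw [hlen]; simp)
  intro i h1 h2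
  have hi : i < rows.length + 1 := by rw [← hlen]; exact h1
  rw [List.getElem_map, PySem.List.getElem_pyRange_one]
  simp only [zero_add]
  rw [← List.getD_eq_getElem _ 0 h2, pvR0_getD (rows.length + 1) (by omega) i hi]
  by_cases hi0 : i = 0
  · subst hi0
    rw [if_pos rfl]
    exact pvFactorB_root _ _
  · rw [if_neg hi0]
    exact pvFactorB_zero_of _ hsrc _ _ (by exact_mod_cast hi0)

-- ===== VERDICT =====
theorem baseUnitConversions_spec : Claim_equal_baseUnitConversions := by
  intro conversions _ hPre
  unfold Spec_baseUnitConversions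
  obtain ⟨hsh, hbr⟩ := hPre
  rcases hbr with h0 | ⟨h2, hnd⟩
  · rw [pvQuiet_A conversions hsh h0,
        pvQuiet_B conversions (fun row hr => (hsh row hr).1) (fun row hr => (h0 row hr).1)]
  · have hRow := pvPre_rowsOK conversions hsh h2
    have hnd' : (conversions.map pvTgt).Nodup := hnd
    obtain ⟨hal, had⟩ := pvPortA_val conversions hRow hnd'
    obtain ⟨hbl, hbd⟩ := pvPortB_val conversions hRow hnd'
    apply List.ext_getElem (by rw [hal, hbl])
    intro i h1 h2
    have hi : i < pvN conversions := by rw [← hal]; exact h1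
    have ha := had i hi
    have hb := hbd i hi
    rw [List.getD_eq_getElem _ _ h1] at ha
    rw [List.getD_eq_getElem _ _ h2] at hb
    rw [ha, hb]
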